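-- pv_equiv track=rewrite | github.com/renanfulas/OctoBox | quick_sales/services/matching.py | normalize_quick_product_name
-- ===== SOURCE A (Python) =====
-- import unicodedata
--
-- def normalize_quick_product_name(raw_value):
--     text = str(raw_value or '').strip()
--     if not text:
--         return ''
--
--     normalized = unicodedata.normalize('NFKD', text)
--     without_accents = ''.join(character for character in normalized if not unicodedata.combining(character))
--     cleaned = ''.join(character if character.isalnum() else ' ' for character in without_accents.casefold())
--     return ' '.join(cleaned.split())
-- ===== SOURCE B (Python) =====
-- import unicodedata
--
--
-- def normalize_quick_product_name(raw_value):
--     text = str(raw_value or '')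
--     decomposed = unicodedata.normalize('NFKD', text)
--     folded = ''.join(c for c in decomposed if not unicodedata.combining(c)).casefold()
--     words = []
--     buffer = []
--     for character in folded:
--         if character.isalnum():
--             buffer.append(character)
--         elif buffer:
--             words.append(''.join(buffer))
--             buffer = []
--     if buffer:
--         words.append(''.join(buffer))
--     return ' '.join(words)
-- ===== Notes on version B (the rewrite author's own statement) =====
-- stated objective: alternative
-- what changed: A builds an intermediate string with non-alnum characters replaced by spaces and then splits and re-joins it; B makes a single tokenizing pass over the casefolded accent-stripped characters, accumulating a word buffer and flushing it into a word list on separators (no strip, no intermediate spaced string, no split).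
import Mathlib
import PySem

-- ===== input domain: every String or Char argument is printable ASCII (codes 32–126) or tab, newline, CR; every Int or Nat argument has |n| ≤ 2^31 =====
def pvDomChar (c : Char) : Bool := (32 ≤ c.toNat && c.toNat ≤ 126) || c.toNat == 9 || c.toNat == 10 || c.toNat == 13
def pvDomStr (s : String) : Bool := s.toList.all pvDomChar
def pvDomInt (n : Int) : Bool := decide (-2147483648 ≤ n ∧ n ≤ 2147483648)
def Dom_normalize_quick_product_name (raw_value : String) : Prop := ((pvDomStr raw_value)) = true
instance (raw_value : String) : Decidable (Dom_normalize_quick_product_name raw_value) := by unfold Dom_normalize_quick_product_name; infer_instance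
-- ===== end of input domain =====

-- B replaces A's "replace non-alnum by spaces, then split and re-join" with a single
-- tokenizing pass that maintains a word buffer and a word list (objective: alternative,
-- same asymptotic cost). On the ASCII input domain, NFKD normalization is the identity,
-- no character is a combining mark, and casefold coincides with lower — the ports use
-- these facts (exact on the stated domain).

-- ===== PORT A =====
-- str(raw_value or '').strip(): 'raw_value or ""' is raw_value itself for strings
def normalize_quick_product_name (raw_value : String) : String :=
  let text := PySem.Chars.strip raw_value.toList
  if text.isEmpty then "" else
    -- NFKD = identity and no combining marks on ASCII; casefold = lower on ASCII
    let cleaned := (PySem.Chars.lower text).map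
      (fun character => if PySem.Chars.isalnum character then character else ' ')
    String.ofList (PySem.Chars.join [' '] (PySem.Chars.split₀ cleaned))

-- ===== PORT B =====
def pvFlush (buffer : List Char) (words : List (List Char)) : List (List Char) :=
  if buffer.isEmpty then words else words ++ [buffer]

def pvTokenize : List Char → List Char → List (List Char) → List (List Char)
  | [], buffer, words => pvFlush buffer words
  | c :: rest, buffer, words =>
    if PySem.Chars.isalnum c then pvTokenize rest (buffer ++ [c]) words
    else if buffer.isEmpty then pvTokenize rest buffer words
    else pvTokenize rest [] (words ++ [buffer])

-- NFKD = identity, no combining marks, casefold = lower on the ASCII domain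
def normalize_quick_product_name_alt (raw_value : String) : String :=
  let folded := PySem.Chars.lower raw_value.toList
  String.ofList (PySem.Chars.join [' '] (pvTokenize folded [] []))

-- ===== PRECONDITION & SPEC =====
def Spec_normalize_quick_product_name (raw_value : String) (out : String) : Prop := out = normalize_quick_product_name_alt raw_value
instance (raw_value : String) (out : String) : Decidable (Spec_normalize_quick_product_name raw_value out) := by unfold Spec_normalize_quick_product_name; infer_instance

-- ===== CLAIM (what is proved, stated in full; the proofs are below) =====
def Claim_equal_normalize_quick_product_name : Prop := ∀ (raw_value : String), Dom_normalize_quick_product_name raw_value → Spec_normalize_quick_product_name raw_value (normalize_quick_product_name raw_value)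

-- ===== LEMMAS AND PROOFS =====

theorem pvCharNat (a b : Char) : (a ≤ b) ↔ a.toNat ≤ b.toNat := by
  rw [Char.le_def, UInt32.le_iff_toNat_le]; rfl

theorem pvAlnumNotSpace (c : Char) (h : PySem.Chars.isalnum c = true) :
    PySem.Chars.isspace c = false := by
  have e1 : ('A').toNat = 65 := rfl
  have e2 : ('Z').toNat = 90 := rfl
  have e3 : ('a').toNat = 97 := rfl
  have e4 : ('z').toNat = 122 := rfl
  have e5 : ('0').toNat = 48 := rfl
  have e6 : ('9').toNat = 57 := rfl
  simp only [PySem.Chars.isalnum, PySem.Chars.isalpha, PySem.Chars.isdigit, PySem.Chars.isspace,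
    PySem.Chars.isupper, PySem.Chars.islower, pvCharNat,
    Bool.or_eq_true, Bool.and_eq_true, decide_eq_true_eq, Bool.or_eq_false_iff,
    Bool.and_eq_false_iff, decide_eq_false_iff_not, e1, e2, e3, e4, e5, e6] at *
  omega

theorem pvSpaceLower (c : Char) (h : PySem.Chars.isspace c = true) :
    PySem.Chars.lowerChar c = c := by
  have e1 : ('A').toNat = 65 := rfl
  have e2 : ('Z').toNat = 90 := rfl
  have hu : PySem.Chars.isupper c = false := by
    simp only [PySem.Chars.isspace, PySem.Chars.isupper, pvCharNat,
      Bool.or_eq_true, Bool.and_eq_true, decide_eq_true_eq,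
      Bool.and_eq_false_iff, decide_eq_false_iff_not, e1, e2] at *
    omega
  simp [PySem.Chars.lowerChar, hu]

theorem pvSpaceNotAlnum (c : Char) (h : PySem.Chars.isspace c = true) :
    PySem.Chars.isalnum c = false := by
  have e1 : ('A').toNat = 65 := rfl
  have e2 : ('Z').toNat = 90 := rfl
  have e3 : ('a').toNat = 97 := rfl
  have e4 : ('z').toNat = 122 := rfl
  have e5 : ('0').toNat = 48 := rfl
  have e6 : ('9').toNat = 57 := rfl
  simp only [PySem.Chars.isalnum, PySem.Chars.isalpha, PySem.Chars.isdigit, PySem.Chars.isspace,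
    PySem.Chars.isupper, PySem.Chars.islower, pvCharNat,
    Bool.or_eq_true, Bool.and_eq_true, decide_eq_true_eq, Bool.or_eq_false_iff,
    Bool.and_eq_false_iff, decide_eq_false_iff_not, e1, e2, e3, e4, e5, e6] at *
  omega

-- abbreviation for A's per-character replacement
def pvClean (c : Char) : Char := if PySem.Chars.isalnum c then c else ' '

theorem pvSpaceChar : PySem.Chars.isspace ' ' = true := rfl

-- core: A's split₀ over the cleaned characters computes B's tokenizer output
theorem pvGoTokenize (cs : List Char) :
    ∀ (buffer : List Char) (words : List (List Char)),
      PySem.Chars.split₀.go (cs.map pvClean) buffer.reverse words.reverse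
        = pvTokenize cs buffer words := by
  induction cs with
  | nil =>
    intro buffer words
    simp only [List.map_nil, PySem.Chars.split₀.go, pvTokenize, pvFlush]
    by_cases hb : buffer = []
    · simp [hb]
    · simp [hb, List.isEmpty_iff]
  | cons c rest ih =>
    intro buffer words
    simp only [List.map_cons, pvTokenize]
    by_cases ha : PySem.Chars.isalnum c = true
    · have hs : PySem.Chars.isspace c = false := pvAlnumNotSpace c ha
      simp only [pvClean, ha, if_pos, PySem.Chars.split₀.go, hs, Bool.false_eq_true, if_false]
      have : c :: buffer.reverse = (buffer ++ [c]).reverse := by simp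
      rw [this, ih]
    · have hc : pvClean c = ' ' := by simp [pvClean, ha]
      simp only [hc, PySem.Chars.split₀.go, pvSpaceChar, if_true, ha, Bool.false_eq_true, if_false]
      by_cases hb : buffer = []
      · simp only [hb, List.reverse_nil, List.isEmpty_nil, if_pos]
        have := ih ([] : List Char) words
        simpa using this
      · have hbe : buffer.reverse.isEmpty = false := by simp [hb]
        have hbe' : buffer.isEmpty = false := by simp [hb]
        simp only [hbe, Bool.false_eq_true, if_false, hbe', List.reverse_reverse]
        have : buffer :: words.reverse = (words ++ [buffer]).reverse := by simp
        rw [this]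
        have := ih ([] : List Char) (words ++ [buffer])
        simpa using this

-- an all-whitespace run at the end of the input contributes nothing
theorem pvGoAllSpace (sp : List Char) (hsp : ∀ c ∈ sp, PySem.Chars.isspace c = true) :
    ∀ (cur : List Char) (acc : List (List Char)),
      PySem.Chars.split₀.go sp cur acc = PySem.Chars.split₀.go [] cur acc := by
  induction sp with
  | nil => intro cur acc; rfl
  | cons c rest ih =>
    intro cur acc
    have hc : PySem.Chars.isspace c = true := hsp c (List.mem_cons_self)
    have hrest : ∀ c ∈ rest, PySem.Chars.isspace c = true :=
      fun c hcm => hsp c (List.mem_cons_of_mem _ hcm)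
    simp only [PySem.Chars.split₀.go, hc, if_true]
    by_cases hcur : cur.isEmpty = true
    · rw [if_pos hcur, ih hrest]
      simp [PySem.Chars.split₀.go, List.isEmpty_iff.mp hcur]
    · rw [if_neg hcur, ih hrest]
      simp only [PySem.Chars.split₀.go, List.isEmpty_nil, if_pos, hcur]
      simp [List.isEmpty_iff] at hcur
      simp

theorem pvGoTrailing (sp : List Char) (hsp : ∀ c ∈ sp, PySem.Chars.isspace c = true)
    (xs : List Char) :
    ∀ (cur : List Char) (acc : List (List Char)),
      PySem.Chars.split₀.go (xs ++ sp) cur acc = PySem.Chars.split₀.go xs cur acc := by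
  induction xs with
  | nil => intro cur acc; simpa using pvGoAllSpace sp hsp cur acc
  | cons c rest ih =>
    intro cur acc
    simp only [List.cons_append, PySem.Chars.split₀.go]
    by_cases hc : PySem.Chars.isspace c = true
    · simp only [hc, if_true]
      by_cases hcur : cur.isEmpty = true
      · rw [if_pos hcur, if_pos hcur, ih]
      · rw [if_neg hcur, if_neg hcur, ih]
    · simp only [hc, if_neg, Bool.not_eq_true] at *
      simp [ih]

theorem pvGoLeading (ws : List Char) (hws : ∀ c ∈ ws, PySem.Chars.isspace c = true)
    (rest : List Char) :
    ∀ (acc : List (List Char)),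
      PySem.Chars.split₀.go (ws ++ rest) [] acc = PySem.Chars.split₀.go rest [] acc := by
  induction ws with
  | nil => intro acc; rfl
  | cons c tl ih =>
    intro acc
    have hc : PySem.Chars.isspace c = true := hws c (List.mem_cons_self)
    have htl : ∀ c ∈ tl, PySem.Chars.isspace c = true :=
      fun c hcm => hws c (List.mem_cons_of_mem _ hcm)
    simp only [List.cons_append, PySem.Chars.split₀.go, hc, if_true, List.isEmpty_nil]
    exact ih htl acc

-- per-character: cleaning after lowering sends whitespace to ' '
theorem pvCleanLowerSpace (c : Char) (h : PySem.Chars.isspace c = true) :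
    pvClean (PySem.Chars.lowerChar c) = ' ' := by
  rw [pvSpaceLower c h]
  simp [pvClean, pvSpaceNotAlnum c h]

-- stripping before cleaning does not change the word list
theorem pvSplitStrip (cs : List Char) :
    PySem.Chars.split₀ (((PySem.Chars.strip cs).map
        (fun c => pvClean (PySem.Chars.lowerChar c))))
      = PySem.Chars.split₀ ((cs.map (fun c => pvClean (PySem.Chars.lowerChar c)))) := by
  have hdecomp : cs = cs.takeWhile PySem.Chars.isspace
      ++ (PySem.Chars.strip cs
      ++ ((cs.dropWhile PySem.Chars.isspace).reverse.takeWhile PySem.Chars.isspace).reverse) := by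
    conv_lhs => rw [← List.takeWhile_append_dropWhile (p := PySem.Chars.isspace) (l := cs)]
    congr 1
    have h2 : cs.dropWhile PySem.Chars.isspace
        = ((cs.dropWhile PySem.Chars.isspace).reverse.dropWhile PySem.Chars.isspace).reverse
        ++ ((cs.dropWhile PySem.Chars.isspace).reverse.takeWhile PySem.Chars.isspace).reverse := by
      rw [← List.reverse_append, List.takeWhile_append_dropWhile, List.reverse_reverse]
    conv_lhs => rw [h2]
    rfl
  have hpre : ∀ c ∈ (cs.takeWhile PySem.Chars.isspace).map
      (fun c => pvClean (PySem.Chars.lowerChar c)), PySem.Chars.isspace c = true := by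
    intro c hc
    rcases List.mem_map.mp hc with ⟨d, hd, rfl⟩
    rw [pvCleanLowerSpace d (List.mem_takeWhile_imp hd)]
    exact pvSpaceChar
  have hsuf : ∀ c ∈ (((cs.dropWhile PySem.Chars.isspace).reverse.takeWhile
      PySem.Chars.isspace).reverse).map (fun c => pvClean (PySem.Chars.lowerChar c)),
      PySem.Chars.isspace c = true := by
    intro c hc
    rcases List.mem_map.mp hc with ⟨d, hd, rfl⟩
    rw [pvCleanLowerSpace d (List.mem_takeWhile_imp (List.mem_reverse.mp hd))]
    exact pvSpaceChar
  conv_rhs => rw [hdecomp]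
  unfold PySem.Chars.split₀
  rw [List.map_append, pvGoLeading _ hpre, List.map_append, pvGoTrailing _ hsuf]

-- ===== VERDICT (by name: the statement is the Claim_ definition above) =====
theorem normalize_quick_product_name_spec : Claim_equal_normalize_quick_product_name := by
  intro raw_value _
  unfold Spec_normalize_quick_product_name
  unfold normalize_quick_product_name normalize_quick_product_name_alt
  have hmap : ∀ l : List Char,
      (PySem.Chars.lower l).map pvClean = l.map (fun c => pvClean (PySem.Chars.lowerChar c)) := by
    intro l; simp [PySem.Chars.lower, List.map_map]
  have hkey : PySem.Chars.split₀ ((PySem.Chars.lower (PySem.Chars.strip raw_value.toList)).map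
      pvClean) = pvTokenize (PySem.Chars.lower raw_value.toList) [] [] := by
    rw [hmap, pvSplitStrip, ← hmap]
    have := pvGoTokenize (PySem.Chars.lower raw_value.toList) [] []
    simpa [PySem.Chars.split₀] using this
  by_cases he : (PySem.Chars.strip raw_value.toList).isEmpty = true
  · simp only [he, ite_true]
    have hnil : PySem.Chars.strip raw_value.toList = [] := List.isEmpty_iff.mp he
    have : pvTokenize (PySem.Chars.lower raw_value.toList) [] [] = [] := by
      rw [← hkey, hnil]
      rfl
    rw [this]
    rfl
  · simp only [he, Bool.false_eq_true, if_false]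
    have hl : (fun character => if PySem.Chars.isalnum character then character else ' ') = pvClean := rfl
    rw [hl, hkey]
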